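-- pv_equiv track=rewrite | github.com/facebookresearch/optimizers | distributed_shampoo/shampoo_utils.py | merge_small_dims
-- ===== SOURCE A (Python) =====
-- from typing import List, Optional, Tuple, Union
--
-- def merge_small_dims(tensor_shape: List[int], threshold: int) -> List[int]:
--     """Reshapes tensor by merging small dimensions.
--
--     Args:
--         tensor_shape (List[int]): The shape of the tensor.
--         threshold (int): Threshold on the maximum size of each dimension.
--
--     Returns:
--         new_tensor_shape (List[int]): New tensor shape.
--
--     """
--
--     new_tensor_shape = [tensor_shape[0]]
--     for next_tensor_shape in tensor_shape[1:]:
--         new_dimension = new_tensor_shape[-1] * next_tensor_shape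
--         if (
--             new_tensor_shape[-1] == 1
--             or next_tensor_shape == 1
--             or new_dimension <= threshold
--         ):
--             new_tensor_shape[-1] = new_dimension
--         else:
--             new_tensor_shape.append(next_tensor_shape)
--
--     return new_tensor_shape
-- ===== SOURCE B (Python) =====
-- def merge_small_dims(tensor_shape, threshold):
--     def prod(g):
--         p = 1
--         for x in g:
--             p *= x
--         return p
--
--     groups = [[tensor_shape[0]]]
--     for d in tensor_shape[1:]:
--         p = prod(groups[-1])
--         if p == 1 or d == 1 or p * d <= threshold:
--             groups[-1].append(d)
--         else:
--             groups.append([d])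
--     return [prod(g) for g in groups]
-- ===== Notes on version B (the rewrite author's own statement) =====
-- stated objective: alternative
-- what changed: B first builds an explicit partition of the dimensions into groups and only then computes each merged size as the product of its group, instead of maintaining running merged sizes in place.
import Mathlib
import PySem

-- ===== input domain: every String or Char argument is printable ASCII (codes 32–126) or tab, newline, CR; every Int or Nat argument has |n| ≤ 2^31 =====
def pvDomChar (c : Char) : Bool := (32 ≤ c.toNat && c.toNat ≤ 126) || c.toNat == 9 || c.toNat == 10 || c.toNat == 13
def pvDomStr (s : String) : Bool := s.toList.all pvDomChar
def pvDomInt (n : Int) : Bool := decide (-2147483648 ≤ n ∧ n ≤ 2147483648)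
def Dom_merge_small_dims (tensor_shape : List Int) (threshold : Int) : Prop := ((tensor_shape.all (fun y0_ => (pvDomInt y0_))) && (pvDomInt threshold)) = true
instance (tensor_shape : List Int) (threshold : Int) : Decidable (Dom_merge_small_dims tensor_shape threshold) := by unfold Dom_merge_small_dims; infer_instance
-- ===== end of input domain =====

-- B builds the partition of dimensions first, then takes products per group (same return value; A mutates nothing observable).
-- ===== PORT A =====
-- one loop step of A: inspect/replace the last element of the running shape list
def mergeStepA (threshold : Int) (acc : List Int) (d : Int) : List Int :=
  let last := acc.getLastD 1
  let nd := last * d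
  if last == 1 || d == 1 || nd ≤ threshold then acc.dropLast ++ [nd]
  else acc ++ [d]

def merge_small_dims (tensor_shape : List Int) (threshold : Int) : List Int :=
  match tensor_shape with
  | [] => []   -- Python raises IndexError on tensor_shape[0]; excluded by Pre_
  | h :: t => t.foldl (mergeStepA threshold) [h]

-- ===== PORT B =====
-- B's prod helper (p = 1; for x in g: p *= x)
def prodG (g : List Int) : Int := g.foldl (· * ·) 1

-- one loop step of B: extend the last group or open a new one
def mergeStepB (threshold : Int) (gs : List (List Int)) (d : Int) : List (List Int) :=
  let p := prodG (gs.getLastD [])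
  if p == 1 || d == 1 || p * d ≤ threshold then gs.dropLast ++ [gs.getLastD [] ++ [d]]
  else gs ++ [[d]]

def merge_small_dims_alt (tensor_shape : List Int) (threshold : Int) : List Int :=
  match tensor_shape with
  | [] => []   -- B also raises IndexError here; excluded by Pre_
  | h :: t => (t.foldl (mergeStepB threshold) [[h]]).map prodG

-- ===== PRECONDITION & SPEC =====
-- Pre_ excludes only the empty list, on which the Python A raises IndexError (B raises too).
def Pre_merge_small_dims (tensor_shape : List Int) (threshold : Int) : Prop := tensor_shape ≠ []
instance (tensor_shape : List Int) (threshold : Int) : Decidable (Pre_merge_small_dims tensor_shape threshold) := by unfold Pre_merge_small_dims; infer_instance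
def pvWitness_merge_small_dims : List Int × Int := ([2, 3, 5], 10)

def Spec_merge_small_dims (tensor_shape : List Int) (threshold : Int) (out : List Int) : Prop := out = merge_small_dims_alt tensor_shape threshold
instance (tensor_shape : List Int) (threshold : Int) (out : List Int) : Decidable (Spec_merge_small_dims tensor_shape threshold out) := by unfold Spec_merge_small_dims; infer_instance

-- ===== CLAIM (what is proved, stated in full; the proofs are below) =====
def Claim_equal_merge_small_dims : Prop := ∀ (tensor_shape : List Int) (threshold : Int), Dom_merge_small_dims tensor_shape threshold → Pre_merge_small_dims tensor_shape threshold → Spec_merge_small_dims tensor_shape threshold (merge_small_dims tensor_shape threshold)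

-- ===== LEMMAS AND PROOFS =====
theorem prodG_append_one (g : List Int) (d : Int) : prodG (g ++ [d]) = prodG g * d := by
  simp [prodG]

theorem getLastD_map_prodG (gs : List (List Int)) (h : gs ≠ []) :
    (gs.map prodG).getLastD 1 = prodG (gs.getLastD []) := by
  induction gs with
  | nil => simp at h
  | cons a t ih =>
    cases t with
    | nil => simp [List.getLastD]
    | cons b u => simpa [List.getLastD] using ih (by simp)

theorem step_comm (threshold : Int) (gs : List (List Int)) (d : Int) (h : gs ≠ []) :
    mergeStepA threshold (gs.map prodG) d = (mergeStepB threshold gs d).map prodG := by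
  unfold mergeStepA mergeStepB
  rw [getLastD_map_prodG gs h]
  dsimp only
  split_ifs with hc
  · simp [← List.map_dropLast, prodG_append_one]
  · simp [prodG]

theorem stepB_ne_nil (threshold : Int) (gs : List (List Int)) (d : Int) :
    mergeStepB threshold gs d ≠ [] := by
  unfold mergeStepB
  dsimp only
  split_ifs <;> simp

theorem foldl_comm (threshold : Int) (t : List Int) (gs : List (List Int)) (h : gs ≠ []) :
    t.foldl (mergeStepA threshold) (gs.map prodG) = (t.foldl (mergeStepB threshold) gs).map prodG := by
  induction t generalizing gs with
  | nil => simp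
  | cons d t ih =>
    simp only [List.foldl_cons]
    rw [step_comm threshold gs d h]
    exact ih _ (stepB_ne_nil threshold gs d)

-- ===== VERDICT (by name: the statement is the Claim_ definition above) =====
theorem merge_small_dims_spec : Claim_equal_merge_small_dims := by
  intro ts th _ hpre
  unfold Spec_merge_small_dims merge_small_dims merge_small_dims_alt
  cases ts with
  | nil => exact absurd rfl hpre
  | cons h t =>
    have := foldl_comm th t [[h]] (by simp)
    simpa [prodG] using this
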